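-- pv_equiv track=rewrite | github.com/jeppeter/py-obcode | src/strparser.py | clear_bit
-- ===== SOURCE A (Python) =====
-- def get_bits(num):
--     bits = 0
--     fnum = num
--     while fnum > 0:
--         if fnum & 1:
--             bits += 1
--         fnum >>= 1
--     return bits
--
-- def clear_bit(num,nbit):
--     num = num & 0xff
--     bits = get_bits(num)
--     if bits == 0:
--         return 0
--     needbit = (nbit % bits)
--     needbit += 1
--     cnum = 1
--     fnum = num
--     curbit = 0
--     while curbit < needbit:
--         if fnum & cnum:
--             curbit += 1
--             if curbit == needbit:
--                 fnum = fnum & (~cnum)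
--                 return fnum
--         cnum <<= 1
--     return fnum
-- ===== SOURCE B (Python) =====
-- def clear_bit(num, nbit):
--     m = num & 0xff
--     # popcount via Kernighan's trick: each x &= x-1 erases one set bit
--     bits = 0
--     t = m
--     while t:
--         t &= t - 1
--         bits += 1
--     if bits == 0:
--         return 0
--     # drop the (nbit % bits) lowest set bits, then isolate and clear the next one
--     t = m
--     for _ in range(nbit % bits):
--         t &= t - 1
--     return m ^ (t & -t)
-- ===== Notes on version B (the rewrite author's own statement) =====
-- stated objective: alternative
-- what changed: Replaces A's positional bit scan (shifting a cnum mask over the byte and counting matches) with Kernighan bit-manipulation identities: popcount by repeated t &= t-1, selecting the target bit by dropping the nbit%bits lowest set bits the same way, then isolating it with t & -t and clearing it with XOR.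
import Mathlib
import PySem

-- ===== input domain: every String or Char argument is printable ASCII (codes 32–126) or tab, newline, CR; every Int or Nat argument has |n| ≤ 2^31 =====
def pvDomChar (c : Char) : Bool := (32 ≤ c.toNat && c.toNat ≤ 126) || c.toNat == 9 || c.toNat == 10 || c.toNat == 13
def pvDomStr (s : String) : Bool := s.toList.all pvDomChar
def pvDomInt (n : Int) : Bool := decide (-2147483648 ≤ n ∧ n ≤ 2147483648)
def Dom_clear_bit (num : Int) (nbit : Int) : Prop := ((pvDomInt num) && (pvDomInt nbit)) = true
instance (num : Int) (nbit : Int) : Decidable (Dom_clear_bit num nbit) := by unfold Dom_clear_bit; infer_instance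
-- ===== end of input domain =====

-- B replaces A's positional bit scan with Kernighan bit identities (popcount and bit selection by
-- t &= t-1, isolation by t & -t, clearing by XOR); objective: alternative.

-- ===== PORT A =====
-- while fnum > 0: if fnum & 1: bits += 1; fnum >>= 1
-- ported with fuel: each iteration halves fnum (>>> 1), so fuel 40 covers every |num| ≤ 2^31;
-- the fuel guard only makes the same loop total.
def get_bits_loop (fnum : Int) (bits : Int) : Nat → Int
  | 0 => bits
  | fuel + 1 =>
    if fnum > 0 then
      get_bits_loop (fnum >>> (1:Nat)) (if PySem.Int.band fnum 1 ≠ 0 then bits + 1 else bits) fuel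
    else bits

def get_bits (num : Int) : Int := get_bits_loop num 0 40

-- while curbit < needbit: if fnum & cnum: curbit += 1; if curbit == needbit: return fnum & ~cnum
--                         cnum <<= 1
-- ported with fuel 9: clear_bit calls it with fnum < 256 and needbit ≤ popcount(fnum), so the
-- loop always returns within 8 iterations; the fuel guard only makes the same loop total.
def clear_bit_loop (fnum needbit cnum curbit : Int) : Nat → Int
  | 0 => fnum
  | fuel + 1 =>
    if curbit < needbit then
      if PySem.Int.band fnum cnum ≠ 0 then
        if curbit + 1 = needbit then PySem.Int.band fnum (Int.not cnum)
        else clear_bit_loop fnum needbit (cnum <<< (1:Nat)) (curbit + 1) fuel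
      else clear_bit_loop fnum needbit (cnum <<< (1:Nat)) curbit fuel
    else fnum

def clear_bit (num : Int) (nbit : Int) : Int :=
  let num := PySem.Int.band num 255
  let bits := get_bits num
  if bits = 0 then 0
  else clear_bit_loop num (PySem.Int.mod nbit bits + 1) 1 0 9

-- ===== PORT B =====
-- while t: t &= t - 1; bits += 1
-- ported with fuel 9: t = num & 0xff < 256 has at most 8 set bits, and each iteration clears one;
-- the fuel guard only makes the same loop total.
def popcount_loop (t : Int) (bits : Int) : Nat → Int
  | 0 => bits
  | fuel + 1 =>
    if t ≠ 0 then popcount_loop (PySem.Int.band t (t - 1)) (bits + 1) fuel else bits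

-- for _ in range(k): t &= t - 1   (k = nbit % bits ≥ 0, so .toNat on it is exact)
def drop_loop (t : Int) : Nat → Int
  | 0 => t
  | k + 1 => drop_loop (PySem.Int.band t (t - 1)) k

def clear_bit_alt (num : Int) (nbit : Int) : Int :=
  let m := PySem.Int.band num 255
  let bits := popcount_loop m 0 9
  if bits = 0 then 0
  else
    let t := drop_loop m (PySem.Int.mod nbit bits).toNat
    PySem.Int.bxor m (PySem.Int.band t (-t))

-- ===== PRECONDITION & SPEC =====
def Spec_clear_bit (num : Int) (nbit : Int) (out : Int) : Prop := out = clear_bit_alt num nbit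
instance (num : Int) (nbit : Int) (out : Int) : Decidable (Spec_clear_bit num nbit out) := by unfold Spec_clear_bit; infer_instance

-- ===== CLAIM (what is proved, stated in full; the proofs are below) =====
def Claim_equal_clear_bit : Prop := ∀ (num : Int) (nbit : Int), Dom_clear_bit num nbit → Spec_clear_bit num nbit (clear_bit num nbit)

-- ===== LEMMAS AND PROOFS =====

-- Python's num & 0xff is reduction mod 256
theorem band255_eq_emod (a : Int) : PySem.Int.band a 255 = a % 256 := by
  have h8 := Nat.and_two_pow_sub_one_eq_mod
  by_cases h : 0 ≤ a
  · obtain ⟨n, rfl⟩ := Int.eq_ofNat_of_zero_le h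
    rw [show (255 : Int) = ((255 : Nat) : Int) by norm_num, PySem.Int.band_natCast]
    have := h8 n 8
    norm_num at this
    omega
  · have hgen : ∀ n : Nat, (255 : Nat) &&& n = n % 256 := by
      intro n
      rw [Nat.and_comm]
      have := h8 n 8
      norm_num at this
      exact this
    simp only [PySem.Int.band, Int.reduceToNat]
    rw [if_neg (by omega), if_pos (by norm_num), hgen]
    omega

-- finite facts about the two popcount routines on the masked byte (checked by evaluation)
set_option maxRecDepth 4000 in
theorem gb_facts : ∀ m : Nat, m < 256 →
    (get_bits (m : Int) = 0 ↔ m = 0) ∧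
    0 ≤ get_bits (m : Int) ∧
    get_bits (m : Int) ≤ 8 ∧
    get_bits (m : Int) = popcount_loop (m : Int) 0 9 := by decide

-- the two ports agree on every masked byte and reduced bit index (checked by evaluation)
set_option maxRecDepth 10000 in
theorem key : ∀ m : Nat, m < 256 → ∀ r : Nat, r < 8 →
    clear_bit (m : Int) (r : Int) = clear_bit_alt (m : Int) (r : Int) := by decide

theorem emod_self_of_range {r b : Int} (h0 : 0 ≤ r) (h1 : r < b) :
    PySem.Int.mod r b = r := by
  rw [PySem.Int.mod_eq_emod_of_pos (by omega)]
  exact Int.emod_eq_of_lt h0 h1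

-- ===== VERDICT (by name: the statement is the Claim_ definition above) =====
theorem clear_bit_spec : Claim_equal_clear_bit := by
  intro num nbit _
  unfold Spec_clear_bit
  -- the masked byte
  have hm0 : 0 ≤ num % 256 := Int.emod_nonneg num (by norm_num)
  have hm1 : num % 256 < 256 := Int.emod_lt_of_pos num (by norm_num)
  obtain ⟨M, hMcast, hMlt⟩ : ∃ M : Nat, (M : Int) = num % 256 ∧ M < 256 :=
    ⟨(num % 256).toNat, by omega, by omega⟩
  have mask1 : PySem.Int.band num 255 = (M : Int) := by rw [band255_eq_emod, hMcast]
  have mask2 : PySem.Int.band (M : Int) 255 = (M : Int) := by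
    rw [band255_eq_emod, hMcast]
    exact Int.emod_emod_of_dvd num dvd_rfl
  obtain ⟨hz, hnn, hle8, hpc⟩ := gb_facts M hMlt
  -- reduce num to the masked byte on both sides
  have e1 : clear_bit num nbit = clear_bit (M : Int) nbit := by
    simp only [clear_bit, mask1, mask2]
  have e2 : clear_bit_alt num nbit = clear_bit_alt (M : Int) nbit := by
    simp only [clear_bit_alt, mask1, mask2]
  rw [e1, e2]
  by_cases hM : M = 0
  · -- popcount 0: both return 0
    subst hM
    simp only [clear_bit, clear_bit_alt, mask2]
    rw [if_pos (by decide), if_pos (by decide)]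
  · -- popcount ≥ 1: reduce nbit to r = nbit % bits < 8 on both sides
    have hbpos : 0 < get_bits (M : Int) := by
      have hne : get_bits (M : Int) ≠ 0 := fun h => hM (hz.mp h)
      omega
    have hr0 : 0 ≤ PySem.Int.mod nbit (get_bits (M : Int)) := PySem.Int.mod_nonneg nbit hbpos
    have hr1 : PySem.Int.mod nbit (get_bits (M : Int)) < get_bits (M : Int) :=
      PySem.Int.mod_lt nbit hbpos
    obtain ⟨R, hRcast, hRlt⟩ :
        ∃ R : Nat, (R : Int) = PySem.Int.mod nbit (get_bits (M : Int)) ∧ R < 8 :=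
      ⟨(PySem.Int.mod nbit (get_bits (M : Int))).toNat, by omega, by omega⟩
    have hmodeq : PySem.Int.mod (R : Int) (get_bits (M : Int))
        = PySem.Int.mod nbit (get_bits (M : Int)) := by
      rw [hRcast]
      exact emod_self_of_range hr0 hr1
    have e3 : clear_bit (M : Int) nbit = clear_bit (M : Int) (R : Int) := by
      simp only [clear_bit, mask2, hmodeq]
    have e4 : clear_bit_alt (M : Int) nbit = clear_bit_alt (M : Int) (R : Int) := by
      have hmodeq2 : PySem.Int.mod (R : Int) (popcount_loop (M : Int) 0 9)
          = PySem.Int.mod nbit (popcount_loop (M : Int) 0 9) := by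
        rw [← hpc]
        exact hmodeq
      simp only [clear_bit_alt, mask2, hmodeq2]
    rw [e3, e4]
    exact key M hMlt R hRlt
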